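-- pv_equiv track=rewrite | github.com/bentrevett/CountWorld | utils.py | get_max_lengths
-- ===== SOURCE A (Python) =====
-- def get_max_lengths(all_data):
--     """
--     Given a list of list of (story, query, answer) tuples, get the maximum story, sentence and query lengths
--     """
--     max_story_len = 0
--     max_sent_len = 0
--     max_queries = 0
--     max_query_len = 0
--     using_supporting_answers = False
--
--     for data in all_data:
--         for story, query, answer in data:
--             if len(story) > max_story_len:
--                 max_story_len = len(story)
--             for sentence in story:
--                 if len(sentence) > max_sent_len:
--                     max_sent_len = len(sentence)
--             if len(query) > max_queries:
--                 max_queries = len(query)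
--             for q in query:
--                 if len(q) > max_query_len:
--                     max_query_len = len(q)
--             for a in answer:
--                 if len(a) > 1:
--                     using_supporting_answers = True
--
--     return max_story_len, max_sent_len, max_queries, max_query_len, using_supporting_answers
-- ===== SOURCE B (Python) =====
-- def get_max_lengths(all_data):
--     """
--     Given a list of list of (story, query, answer) tuples, get the maximum story, sentence and query lengths
--     """
--     triples = [t for data in all_data for t in data]
--     max_story_len = max((len(story) for story, query, answer in triples), default=0)
--     max_sent_len = max((len(s) for story, query, answer in triples for s in story), default=0)
--     max_queries = max((len(query) for story, query, answer in triples), default=0)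
--     max_query_len = max((len(q) for story, query, answer in triples for q in query), default=0)
--     using_supporting_answers = any(len(a) > 1 for story, query, answer in triples for a in answer)
--     return max_story_len, max_sent_len, max_queries, max_query_len, using_supporting_answers
-- ===== Notes on version B (the rewrite author's own statement) =====
-- stated objective: simpler
-- what changed: The single fused nested loop threading five accumulators is replaced by flattening once and computing each of the five results with its own built-in max(..., default=0)/any reduction over a comprehension.
import Mathlib
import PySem

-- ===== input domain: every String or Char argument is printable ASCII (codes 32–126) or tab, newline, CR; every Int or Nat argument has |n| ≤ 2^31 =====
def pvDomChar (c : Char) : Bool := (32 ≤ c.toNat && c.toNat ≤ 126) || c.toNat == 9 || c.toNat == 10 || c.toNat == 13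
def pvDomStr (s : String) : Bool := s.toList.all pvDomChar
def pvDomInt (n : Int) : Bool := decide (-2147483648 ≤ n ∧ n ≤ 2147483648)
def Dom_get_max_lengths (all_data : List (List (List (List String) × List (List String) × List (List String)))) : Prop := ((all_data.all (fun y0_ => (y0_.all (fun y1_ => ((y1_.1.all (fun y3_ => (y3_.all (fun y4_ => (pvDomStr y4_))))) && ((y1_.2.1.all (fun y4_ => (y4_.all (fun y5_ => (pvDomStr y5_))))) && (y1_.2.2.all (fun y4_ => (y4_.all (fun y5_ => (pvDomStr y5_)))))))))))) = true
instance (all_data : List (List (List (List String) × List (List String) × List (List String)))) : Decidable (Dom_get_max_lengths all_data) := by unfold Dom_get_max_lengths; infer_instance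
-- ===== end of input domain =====

-- B replaces A's single fused nested loop (five accumulators threaded together) by one flatten
-- followed by five independent built-in reductions (max with default 0 / any); objective: simpler.

-- ===== PORT A =====
-- one (story, query, answer) iteration of A's inner loop, updating the five accumulators
def pvStepA (st : Int × Int × Int × Int × Bool)
    (t : List (List String) × List (List String) × List (List String)) :
    Int × Int × Int × Int × Bool :=
  let (msl, msent, mq, mql, usa) := st
  let (story, query, answer) := t
  let msl := if (story.length : Int) > msl then (story.length : Int) else msl
  let msent := story.foldl (fun m s => if (s.length : Int) > m then (s.length : Int) else m) msent
  let mq := if (query.length : Int) > mq then (query.length : Int) else mq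
  let mql := query.foldl (fun m q => if (q.length : Int) > m then (q.length : Int) else m) mql
  let usa := answer.foldl (fun u a => if a.length > 1 then true else u) usa
  (msl, msent, mq, mql, usa)

def get_max_lengths (all_data : List (List (List (List String) × List (List String) × List (List String)))) : Int × Int × Int × Int × Bool :=
  all_data.foldl (fun st data => data.foldl pvStepA st) (0, 0, 0, 0, false)

-- ===== PORT B =====
def get_max_lengths_alt (all_data : List (List (List (List String) × List (List String) × List (List String)))) : Int × Int × Int × Int × Bool :=
  let triples := all_data.flatMap (fun data => data)
  ( (triples.map (fun t => (t.1.length : Int))).foldl max 0,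
    ((triples.flatMap (fun t => t.1)).map (fun s => (s.length : Int))).foldl max 0,
    (triples.map (fun t => (t.2.1.length : Int))).foldl max 0,
    ((triples.flatMap (fun t => t.2.1)).map (fun q => (q.length : Int))).foldl max 0,
    (triples.flatMap (fun t => t.2.2)).any (fun a => a.length > 1) )

-- ===== PRECONDITION & SPEC =====
def Spec_get_max_lengths (all_data : List (List (List (List String) × List (List String) × List (List String)))) (out : Int × Int × Int × Int × Bool) : Prop := out = get_max_lengths_alt all_data
instance (all_data : List (List (List (List String) × List (List String) × List (List String)))) (out : Int × Int × Int × Int × Bool) : Decidable (Spec_get_max_lengths all_data out) := by unfold Spec_get_max_lengths; infer_instance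

-- ===== CLAIM (what is proved, stated in full; the proofs are below) =====
def Claim_equal_get_max_lengths : Prop := ∀ (all_data : List (List (List (List String) × List (List String) × List (List String)))), Dom_get_max_lengths all_data → Spec_get_max_lengths all_data (get_max_lengths all_data)

-- ===== LEMMAS AND PROOFS =====

theorem pv_ite_max (a x : Int) : (if x > a then x else a) = max a x := by
  split_ifs with h <;> omega

theorem pv_foldl_ite_or (l : List (List String)) (u : Bool) :
    l.foldl (fun v a => if a.length > 1 then true else v) u
      = (u || l.any (fun a => a.length > 1)) := by
  induction l generalizing u with
  | nil => simp
  | cons x xs ih =>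
    rw [List.foldl_cons, List.any_cons, ih]
    by_cases h : x.length > 1 <;> simp [h]

-- A's fold over a flat list of triples, decomposed into B's five independent reductions
theorem pv_fold_decomp (ts : List (List (List String) × List (List String) × List (List String)))
    (a b c d : Int) (u : Bool) :
    ts.foldl pvStepA (a, b, c, d, u) =
    ( (ts.map (fun t => (t.1.length : Int))).foldl max a,
      ((ts.flatMap (fun t => t.1)).map (fun s => (s.length : Int))).foldl max b,
      (ts.map (fun t => (t.2.1.length : Int))).foldl max c,
      ((ts.flatMap (fun t => t.2.1)).map (fun q => (q.length : Int))).foldl max d,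
      u || (ts.flatMap (fun t => t.2.2)).any (fun x => x.length > 1) ) := by
  induction ts generalizing a b c d u with
  | nil => simp
  | cons t rest ih =>
    obtain ⟨story, query, answer⟩ := t
    have hstep : pvStepA (a, b, c, d, u) (story, query, answer) =
        ( max a (story.length : Int),
          (story.map (fun s => (s.length : Int))).foldl max b,
          max c (query.length : Int),
          (query.map (fun q => (q.length : Int))).foldl max d,
          u || answer.any (fun x => x.length > 1) ) := by
      simp only [pvStepA, pv_ite_max, pv_foldl_ite_or, List.foldl_map]
    rw [List.foldl_cons, hstep, ih]
    simp only [List.flatMap_cons, List.map_cons, List.map_append, List.foldl_cons,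
      List.foldl_append, List.any_append, Bool.or_assoc]

-- A's nested fold equals the fold over the flattened triples
theorem pv_fold_flatten (all_data : List (List (List (List String) × List (List String) × List (List String))))
    (st : Int × Int × Int × Int × Bool) :
    all_data.foldl (fun s data => data.foldl pvStepA s) st =
    (all_data.flatMap (fun data => data)).foldl pvStepA st := by
  induction all_data generalizing st with
  | nil => rfl
  | cons d rest ih => simp [List.foldl, ih]

-- ===== VERDICT (by name: the statement is the Claim_ definition above) =====
theorem get_max_lengths_spec : Claim_equal_get_max_lengths := by
  intro all_data _
  unfold Spec_get_max_lengths get_max_lengths get_max_lengths_alt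
  rw [pv_fold_flatten, pv_fold_decomp]
  simp only [Bool.false_or]
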